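-- pv_equiv track=rewrite | github.com/cadulaschi/carbometrix_carlos | Extract_CDP/CDP_xml.py | defining_all_subsections
-- ===== SOURCE A (Python) =====
-- def defining_all_subsections(sections):
--     subsection_name = []
--     subsection = "C"
--
--     for i in range(len(sections)):
--         subsection += str(i) + "."
--         for j in range(20):
--             subsection_name.append(subsection + str(j+1))
--         subsection = "C"
--
--     # add specific subsection names
--     subsection_name.append('C-TS6.15')
--
--     all_subsections = []
--     for i in range(len(sections)):
--         for j in range(len(sections[i])):
--             if sections[i][j] in subsection_name:
--                 all_subsections.append(sections[i][j])
--
--     return all_subsections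
-- ===== SOURCE B (Python) =====
-- # Single pass over the cells with an O(|cell|) predicate instead of building the
-- # quadratic name table; decimal strings are compared numerically by (length, lex),
-- # which is valid because both sides are canonical (no leading zeros).
--
-- _J_STRS = tuple(str(j) for j in range(1, 21))
--
--
-- def _is_subsection(s, n):
--     if s == 'C-TS6.15':
--         return True
--     if not s.startswith('C'):
--         return False
--     dot = s.find('.')
--     if dot < 0:
--         return False
--     a, b = s[1:dot], s[dot + 1:]
--     if not a.isdigit():
--         return False
--     if a != '0' and a.startswith('0'):
--         return False          # generated names carry no leading zeros
--     m = str(n)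
--     return (len(a) < len(m) or (len(a) == len(m) and a < m)) and b in _J_STRS
--
--
-- def defining_all_subsections(sections):
--     n = len(sections)
--     out = []
--     for row in sections:
--         for cell in row:
--             if _is_subsection(cell, n):
--                 out.append(cell)
--     return out
-- ===== Notes on version B (the rewrite author's own statement) =====
-- stated objective: faster
-- what changed: B drops the generated name table entirely: it scans the cells once and accepts a cell via an O(|cell|) syntactic predicate (canonical decimal section index compared to str(len(sections)) by length-then-lex, subsection part looked up among '1'..'20'), instead of A's linear scan of a 20*n-element name list per cell.
import Mathlib
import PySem

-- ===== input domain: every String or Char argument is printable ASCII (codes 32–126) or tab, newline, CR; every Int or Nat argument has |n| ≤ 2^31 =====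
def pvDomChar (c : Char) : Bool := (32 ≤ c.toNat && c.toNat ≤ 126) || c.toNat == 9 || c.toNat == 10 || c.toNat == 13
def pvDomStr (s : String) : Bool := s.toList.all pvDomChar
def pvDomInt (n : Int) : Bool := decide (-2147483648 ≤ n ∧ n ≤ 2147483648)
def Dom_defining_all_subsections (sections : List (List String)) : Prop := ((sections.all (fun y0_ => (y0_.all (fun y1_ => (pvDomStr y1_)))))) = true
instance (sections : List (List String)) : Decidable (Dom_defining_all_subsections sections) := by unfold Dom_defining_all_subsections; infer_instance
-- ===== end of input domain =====

-- B replaces A's generated 20·n-entry name table (scanned per cell) by a single pass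
-- over the cells with a per-cell syntactic predicate; the return values agree on every input.

-- ===== PORT A =====
def defining_all_subsections (sections : List (List String)) : List String :=
  -- subsection_name built by the two generation loops, then 'C-TS6.15' appended
  let subsection_name : List String :=
    ((PySem.List.pyRange 0 (sections.length : Int)).foldl (fun acc i =>
        let subsection := "C" ++ (PySem.Int.toStr i ++ ".")
        (PySem.List.pyRange 0 20).foldl (fun acc2 j =>
          acc2 ++ [subsection ++ PySem.Int.toStr (j + 1)]) acc) [])
      ++ ["C-TS6.15"]
  -- the two filtering loops over indices i, j
  (PySem.List.pyRange 0 (sections.length : Int)).foldl (fun acc i =>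
    let row := PySem.List.pyGetD sections i []
    (PySem.List.pyRange 0 (row.length : Int)).foldl (fun acc2 j =>
      let cell := PySem.List.pyGetD row j ""
      if subsection_name.contains cell then acc2 ++ [cell] else acc2) acc) []

-- ===== PORT B =====
-- B-side helper: _J_STRS = tuple(str(j) for j in range(1, 21))
def pyJStrs : List String := (PySem.List.pyRange 1 21).map PySem.Int.toStr

-- B-side helper: _is_subsection(s, n).  Python's 'a < m' on strings is
-- lexicographic comparison by code point, ported as PySem.Chars.strLt.
def isSubsection (s : String) (n : Int) : Bool :=
  if s == "C-TS6.15" then true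
  else if !(PySem.Str.startswith s "C") then false
  else
    let dot := PySem.Str.find s "."
    if dot < 0 then false
    else
      let a := PySem.Str.slice s (some 1) (some dot)
      let b := PySem.Str.slice s (some (dot + 1)) none
      if !(PySem.Str.strIsdigit a) then false
      else if a != "0" && PySem.Str.startswith a "0" then false
      else
        let m := PySem.Int.toStr n
        (decide (PySem.Str.len a < PySem.Str.len m) ||
          (decide (PySem.Str.len a = PySem.Str.len m) && PySem.Chars.strLt a.toList m.toList))
        && pyJStrs.contains b

def defining_all_subsections_alt (sections : List (List String)) : List String :=
  let n : Int := (sections.length : Int)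
  sections.foldl (fun acc row =>
    row.foldl (fun acc2 cell =>
      if isSubsection cell n then acc2 ++ [cell] else acc2) acc) []

-- ===== PRECONDITION & SPEC =====
def Spec_defining_all_subsections (sections : List (List String)) (out : List String) : Prop := out = defining_all_subsections_alt sections
instance (sections : List (List String)) (out : List String) : Decidable (Spec_defining_all_subsections sections out) := by unfold Spec_defining_all_subsections; infer_instance

-- ===== CLAIM (what is proved, stated in full; the proofs are below) =====
def Claim_equal_defining_all_subsections : Prop := ∀ (sections : List (List String)), Dom_defining_all_subsections sections → Spec_defining_all_subsections sections (defining_all_subsections sections)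

-- ===== LEMMAS AND PROOFS =====

-- proof-only abbreviations
def dVal (ds : List Char) : Nat := ds.foldl (fun a c => 10 * a + (c.toNat - 48)) 0
def mkName (i j : Int) : String := "C" ++ (PySem.Int.toStr i ++ ".") ++ PySem.Int.toStr j
def Good (n : Int) (s : String) : Prop :=
  s = "C-TS6.15" ∨ ∃ i j : Int, 0 ≤ i ∧ i < n ∧ 1 ≤ j ∧ j ≤ 20 ∧ s = mkName i j

-- ---- character facts ----
theorem char_eq_of_toNat_eq {a b : Char} (h : a.toNat = b.toNat) : a = b :=
  Char.ext (UInt32.toNat_inj.mp h)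

theorem char_lt_iff_toNat {a b : Char} : a < b ↔ a.toNat < b.toNat := by
  simp [Char.lt_def, UInt32.lt_iff_toNat_lt]

theorem isdigit_bounds {c : Char} (h : PySem.Chars.isdigit c = true) :
    48 ≤ c.toNat ∧ c.toNat ≤ 57 := by
  simp [PySem.Chars.isdigit, Char.le_def] at h
  exact ⟨h.1, h.2⟩

theorem digitChar_toNat : ∀ d < 10, (Nat.digitChar d).toNat = 48 + d := by decide

theorem digitChar_of_isdigit {c : Char} (h : PySem.Chars.isdigit c = true) :
    Nat.digitChar (c.toNat - 48) = c := by
  obtain ⟨h1, h2⟩ := isdigit_bounds h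
  exact char_eq_of_toNat_eq (by rw [digitChar_toNat _ (by omega)]; omega)

theorem digitChar_lt_iff {a b : Nat} (ha : a < 10) (hb : b < 10) :
    Nat.digitChar a < Nat.digitChar b ↔ a < b := by
  rw [char_lt_iff_toNat, digitChar_toNat _ ha, digitChar_toNat _ hb]
  omega

theorem isdigit_ne_dot {c : Char} (h : PySem.Chars.isdigit c = true) : c ≠ '.' := by
  obtain ⟨h1, _⟩ := isdigit_bounds h
  intro he
  rw [he] at h1
  have : ('.' : Char).toNat = 46 := by decide
  omega

theorem isdigit_of_isDigit {c : Char} (h : c.isDigit = true) : PySem.Chars.isdigit c = true := by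
  unfold Char.isDigit at h
  rw [Bool.and_eq_true, decide_eq_true_eq, decide_eq_true_eq] at h
  unfold PySem.Chars.isdigit
  rw [Bool.and_eq_true, decide_eq_true_eq, decide_eq_true_eq]
  exact ⟨h.1, h.2⟩

-- ---- decimal digit-string facts ----
theorem toDigits_digits {m : Nat} {c : Char} (h : c ∈ Nat.toDigits 10 m) :
    PySem.Chars.isdigit c = true :=
  isdigit_of_isDigit (Nat.isDigit_of_mem_toDigits (by norm_num) (le_refl 10) h)

theorem toDigits_ne_nil (m : Nat) : Nat.toDigits 10 m ≠ [] :=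
  List.ne_nil_of_length_pos Nat.length_toDigits_pos

theorem toDigits_head_ne_zero : ∀ m, 0 < m → (Nat.toDigits 10 m).head? ≠ some '0' := by
  intro m
  induction m using Nat.strong_induction_on with
  | _ m ih =>
    intro hm
    by_cases h10 : m < 10
    · rw [Nat.toDigits_of_lt_base h10]
      intro hcon
      simp only [List.head?_cons, Option.some.injEq] at hcon
      have := congrArg Char.toNat hcon
      rw [digitChar_toNat _ h10] at this
      have h0 : ('0' : Char).toNat = 48 := by decide
      omega
    · rw [Nat.toDigits_of_base_le (by norm_num) (le_of_not_gt h10)]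
      intro hcon
      rw [List.head?_append] at hcon
      cases hh : (Nat.toDigits 10 (m / 10)).head? with
      | none =>
        exact toDigits_ne_nil (m / 10) (List.head?_eq_none_iff.mp hh)
      | some x =>
        rw [hh] at hcon
        simp only [Option.some_or, Option.some.injEq] at hcon
        exact ih (m / 10) (by omega) (by omega) (by rw [hh, hcon])

theorem dVal_toDigits : ∀ m, dVal (Nat.toDigits 10 m) = m := by
  intro m
  induction m using Nat.strong_induction_on with
  | _ m ih =>
    by_cases h10 : m < 10
    · rw [Nat.toDigits_of_lt_base h10]
      simp only [dVal, List.foldl_cons, List.foldl_nil]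
      rw [digitChar_toNat _ h10]
      omega
    · rw [Nat.toDigits_of_base_le (by norm_num) (le_of_not_gt h10)]
      have hmod : m % 10 < 10 := Nat.mod_lt _ (by norm_num)
      simp only [dVal, List.foldl_append, List.foldl_cons, List.foldl_nil]
      have := ih (m / 10) (by omega)
      simp only [dVal] at this
      rw [this, digitChar_toNat _ hmod]
      omega

theorem toDigits_inj {a b : Nat} (h : Nat.toDigits 10 a = Nat.toDigits 10 b) : a = b := by
  have := congrArg dVal h
  rwa [dVal_toDigits, dVal_toDigits] at this

theorem le_dVal_foldl (t : List Char) :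
    ∀ acc, acc ≤ t.foldl (fun a c => 10 * a + (c.toNat - 48)) acc := by
  induction t with
  | nil => intro acc; simp
  | cons c t ih =>
    intro acc
    calc acc ≤ 10 * acc + (c.toNat - 48) := by omega
    _ ≤ _ := ih _

theorem dVal_pos {h : Char} {t : List Char} (hd : PySem.Chars.isdigit h = true)
    (hz : h ≠ '0') : 0 < dVal (h :: t) := by
  obtain ⟨h1, h2⟩ := isdigit_bounds hd
  have hne : h.toNat ≠ 48 := by
    intro he
    exact hz (char_eq_of_toNat_eq (he.trans (by decide)))
  have : 10 * 0 + (h.toNat - 48) ≤ dVal (h :: t) := by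
    simp only [dVal, List.foldl_cons]
    exact le_dVal_foldl t _
  omega

theorem toDigits_dVal : ∀ ds : List Char, ds ≠ [] →
    (∀ c ∈ ds, PySem.Chars.isdigit c = true) →
    (ds = ['0'] ∨ ds.head? ≠ some '0') →
    Nat.toDigits 10 (dVal ds) = ds := by
  intro ds
  induction ds using List.reverseRecOn with
  | nil => intro h; exact absurd rfl h
  | append_singleton xs c ih =>
    intro _ hdig hcanon
    have hc : PySem.Chars.isdigit c = true := hdig c (by simp)
    have hcb := isdigit_bounds hc
    have hdvc : c.toNat - 48 < 10 := by omega
    have hdc : Nat.digitChar (c.toNat - 48) = c := digitChar_of_isdigit hc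
    cases xs with
    | nil =>
      simp only [List.nil_append]
      have hval : dVal [c] = c.toNat - 48 := by simp [dVal]
      rw [hval, Nat.toDigits_of_lt_base hdvc, hdc]
    | cons h t =>
      have hval : dVal ((h :: t) ++ [c]) = 10 * dVal (h :: t) + (c.toNat - 48) := by
        simp [dVal, List.foldl_append]
      have hhead : h ≠ '0' := by
        rcases hcanon with h1 | h2
        · exfalso
          have hlen := congrArg List.length h1
          simp only [List.length_append, List.length_cons, List.length_nil] at hlen
          omega
        · intro he
          apply h2
          rw [List.cons_append, List.head?_cons, he]
      have hpos : 0 < dVal (h :: t) := dVal_pos (hdig h (by simp)) hhead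
      have ihh := ih (by simp) (fun d hd => hdig d (List.mem_append_left _ hd))
        (Or.inr (by simp [hhead]))
      rw [hval, ← Nat.toDigits_append_toDigits (by norm_num) hpos hdvc, ihh,
        Nat.toDigits_of_lt_base hdvc, hdc]

theorem toDigits_len_one_iff (m : Nat) : (Nat.toDigits 10 m).length = 1 ↔ m < 10 := by
  constructor
  · intro h
    by_contra h10
    rw [Nat.toDigits_of_base_le (by norm_num) (le_of_not_gt h10)] at h
    have := Nat.length_toDigits_pos (b := 10) (n := m / 10)
    rw [List.length_append, List.length_cons, List.length_nil] at h
    omega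
  · intro h
    rw [Nat.toDigits_of_lt_base h]
    rfl

theorem lex_append_iff : ∀ {xs ys : List Char} {x y : Char}, xs.length = ys.length →
    ((xs ++ [x] < ys ++ [y]) ↔ (xs < ys ∨ (xs = ys ∧ x < y))) := by
  intro xs
  induction xs with
  | nil =>
    intro ys x y h
    have : ys = [] := List.eq_nil_of_length_eq_zero h.symm
    subst this
    simp [List.cons_lt_cons_iff]
  | cons a t ih =>
    intro ys x y h
    cases ys with
    | nil => simp at h
    | cons b u =>
      simp only [List.length_cons, Nat.add_right_cancel_iff] at h
      simp only [List.cons_append, List.cons_lt_cons_iff, ih h, List.cons.injEq]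
      tauto

theorem toDigits_lt_iff : ∀ m k : Nat, (Nat.toDigits 10 m).length = (Nat.toDigits 10 k).length →
    (Nat.toDigits 10 m < Nat.toDigits 10 k ↔ m < k) := by
  intro m
  induction m using Nat.strong_induction_on with
  | _ m ih =>
    intro k h
    by_cases hm : m < 10 <;> by_cases hk : k < 10
    · rw [Nat.toDigits_of_lt_base hm, Nat.toDigits_of_lt_base hk]
      have := lex_append_iff (xs := ([] : List Char)) (ys := [])
        (x := Nat.digitChar m) (y := Nat.digitChar k) rfl
      simp only [List.nil_append] at this
      rw [this]
      simp [digitChar_lt_iff hm hk]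
    · exfalso
      have h1 : (Nat.toDigits 10 m).length = 1 := (toDigits_len_one_iff m).mpr hm
      have h2 : ¬ (Nat.toDigits 10 k).length = 1 := by
        rw [toDigits_len_one_iff]; omega
      omega
    · exfalso
      have h1 : (Nat.toDigits 10 k).length = 1 := (toDigits_len_one_iff k).mpr hk
      have h2 : ¬ (Nat.toDigits 10 m).length = 1 := by
        rw [toDigits_len_one_iff]; omega
      omega
    · rw [Nat.toDigits_of_base_le (by norm_num) (le_of_not_gt hm),
        Nat.toDigits_of_base_le (by norm_num) (le_of_not_gt hk)] at h ⊢
      simp only [List.length_append, List.length_cons, List.length_nil] at h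
      have h' : (Nat.toDigits 10 (m / 10)).length = (Nat.toDigits 10 (k / 10)).length := by omega
      have h1 := ih (m / 10) (by omega) (k / 10) h'
      have h2 : (Nat.toDigits 10 (m / 10) = Nat.toDigits 10 (k / 10)) ↔ m / 10 = k / 10 :=
        ⟨toDigits_inj, fun e => by rw [e]⟩
      have h3 := digitChar_lt_iff (a := m % 10) (b := k % 10)
        (Nat.mod_lt _ (by norm_num)) (Nat.mod_lt _ (by norm_num))
      rw [lex_append_iff h', h1, h2, h3]
      omega

theorem cmp_iff (m k : Nat) :
    ((Nat.toDigits 10 m).length < (Nat.toDigits 10 k).length ∨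
      ((Nat.toDigits 10 m).length = (Nat.toDigits 10 k).length ∧
        Nat.toDigits 10 m < Nat.toDigits 10 k)) ↔ m < k := by
  have hmp := Nat.length_toDigits_pos (b := 10) (n := m)
  have hkp := Nat.length_toDigits_pos (b := 10) (n := k)
  constructor
  · rintro (hlen | ⟨hlen, hlex⟩)
    · have hm : m < 10 ^ (Nat.toDigits 10 m).length :=
        (Nat.length_toDigits_le_iff (by norm_num) hmp).mp (le_refl _)
      have hk : ¬ k < 10 ^ ((Nat.toDigits 10 k).length - 1) := by
        intro hcon
        have := (Nat.length_toDigits_le_iff (b := 10) (n := k)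
          (k := (Nat.toDigits 10 k).length - 1) (by norm_num) (by omega)).mpr hcon
        omega
      have hpow : 10 ^ (Nat.toDigits 10 m).length ≤ 10 ^ ((Nat.toDigits 10 k).length - 1) :=
        Nat.pow_le_pow_right (by norm_num) (by omega)
      omega
    · exact (toDigits_lt_iff m k hlen).mp hlex
  · intro hmk
    by_cases hlen : (Nat.toDigits 10 m).length = (Nat.toDigits 10 k).length
    · exact Or.inr ⟨hlen, (toDigits_lt_iff m k hlen).mpr hmk⟩
    · left
      have hkk : k < 10 ^ (Nat.toDigits 10 k).length :=
        (Nat.length_toDigits_le_iff (by norm_num) hkp).mp (le_refl _)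
      have hmle : (Nat.toDigits 10 m).length ≤ (Nat.toDigits 10 k).length :=
        (Nat.length_toDigits_le_iff (by norm_num) hkp).mpr (by omega)
      omega

theorem toChars_natCast (m : Nat) : PySem.Int.toChars (m : Int) = Nat.toDigits 10 m := by
  simp [PySem.Int.toChars]

-- ---- find helpers ----
theorem singleton_prefix_iff (c : Char) (l : List Char) : [c] <+: l ↔ l.head? = some c := by
  cases l with
  | nil => simp
  | cons h t => simp [List.cons_prefix_cons, eq_comm]

theorem find_unique {cs sub : List Char} {k : Nat}
    (h1 : sub <+: cs.drop k) (h2 : ∀ i < k, ¬ sub <+: cs.drop i) :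
    PySem.Chars.find cs sub = (k : Int) := by
  have hinfix : sub <:+: cs := by
    obtain ⟨t, ht⟩ := h1
    exact ⟨cs.take k, t, by rw [List.append_assoc, ht, List.take_append_drop]⟩
  have hnn := (PySem.Chars.find_nonneg_iff cs sub).mpr hinfix
  obtain ⟨hpre, hmin⟩ := PySem.Chars.find_spec hnn
  rcases Nat.lt_trichotomy (PySem.Chars.find cs sub).toNat k with hlt | heq | hgt
  · exact absurd hpre (h2 _ hlt)
  · omega
  · exact absurd h1 (hmin k hgt)

-- ---- the A-side characterisation ----
theorem mem_names (n : Int) (s : String) :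
    (s ∈ (((PySem.List.pyRange 0 n).foldl (fun acc i =>
        let subsection := "C" ++ (PySem.Int.toStr i ++ ".")
        (PySem.List.pyRange 0 20).foldl (fun acc2 j =>
          acc2 ++ [subsection ++ PySem.Int.toStr (j + 1)]) acc) [])
      ++ ["C-TS6.15"])) ↔ Good n s := by
  simp only [PySem.List.foldl_append_singleton_eq_map, PySem.List.foldl_append_eq_flatMap,
    List.nil_append]
  simp only [List.mem_append, List.mem_flatMap, List.mem_map, List.mem_singleton,
    PySem.List.mem_pyRange_one, Good]
  constructor
  · rintro (⟨i, ⟨hi0, hin⟩, j', ⟨hj0, hj20⟩, rfl⟩ | rfl)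
    · refine Or.inr ⟨i, j' + 1, hi0, hin, by omega, by omega, rfl⟩
    · exact Or.inl rfl
  · rintro (rfl | ⟨i, j, hi0, hin, hj1, hj20, rfl⟩)
    · exact Or.inr rfl
    · refine Or.inl ⟨i, ⟨hi0, hin⟩, j - 1, ⟨by omega, by omega⟩, ?_⟩
      rw [mkName, sub_add_cancel]

-- ---- the B-side characterisation ----
theorem toList_C : ("C" : String).toList = ['C'] := rfl
theorem toList_dot : ("." : String).toList = ['.'] := rfl
theorem toList_zero : ("0" : String).toList = ['0'] := rfl

theorem strIsdigit_char_iff (a : String) :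
    PySem.Str.strIsdigit a = true ↔
      a.toList ≠ [] ∧ ∀ c ∈ a.toList, PySem.Chars.isdigit c = true := by
  rw [PySem.Str.strIsdigit_eq]
  unfold PySem.Chars.strIsdigit
  simp [List.all_eq_true]

theorem startswith_zero_iff (a : String) :
    PySem.Str.startswith a "0" = true ↔ a.toList.head? = some '0' := by
  rw [PySem.Str.startswith_eq, PySem.Chars.startswith_iff, toList_zero,
    singleton_prefix_iff]

theorem mem_pyJStrs_iff (b : String) :
    b ∈ pyJStrs ↔ ∃ j : Int, 1 ≤ j ∧ j ≤ 20 ∧ b = PySem.Int.toStr j := by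
  simp only [pyJStrs, List.mem_map, PySem.List.mem_pyRange_one]
  constructor
  · rintro ⟨j, ⟨hj1, hj21⟩, rfl⟩
    exact ⟨j, hj1, by omega, rfl⟩
  · rintro ⟨j, hj1, hj20, rfl⟩
    exact ⟨j, ⟨hj1, by omega⟩, rfl⟩

theorem mkName_toList (i j : Int) (hi : 0 ≤ i) :
    (mkName i j).toList
      = 'C' :: (Nat.toDigits 10 i.toNat ++ '.' :: (PySem.Int.toStr j).toList) := by
  obtain ⟨it, rfl⟩ := Int.eq_ofNat_of_zero_le hi
  simp [mkName, String.toList_append, PySem.Int.toList_toStr, toChars_natCast, toList_C,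
    toList_dot]

theorem toStr_nat_toList (n : Nat) :
    (PySem.Int.toStr (n : Int)).toList = Nat.toDigits 10 n := by
  rw [PySem.Int.toList_toStr, toChars_natCast]

-- the find computation on a well-formed name body
theorem find_name (ds rest : List Char) (hdig : ∀ c ∈ ds, PySem.Chars.isdigit c = true) :
    PySem.Chars.find ('C' :: (ds ++ '.' :: rest)) ['.'] = ((1 + ds.length : Nat) : Int) := by
  apply find_unique
  · have : ('C' :: (ds ++ '.' :: rest)).drop (1 + ds.length) = '.' :: rest := by
      rw [Nat.add_comm, List.drop_succ_cons, List.drop_append_of_le_length (le_refl _),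
        List.drop_length, List.nil_append]
    rw [this, singleton_prefix_iff, List.head?_cons]
  · intro idx hidx
    rw [singleton_prefix_iff]
    cases idx with
    | zero => simp
    | succ ii =>
      have hii : ii < ds.length := by omega
      rw [List.drop_succ_cons, List.drop_append_of_le_length (by omega)]
      have hne : ds.drop ii ≠ [] := by
        intro hnil
        have := List.drop_eq_nil_iff.mp hnil
        omega
      intro hcon
      rw [List.head?_append] at hcon
      cases hh : (ds.drop ii).head? with
      | none => exact hne (List.head?_eq_none_iff.mp hh)
      | some x =>
        rw [hh] at hcon
        simp only [Option.some_or, Option.some.injEq] at hcon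
        have hxmem : x ∈ ds := List.mem_of_mem_drop (List.mem_of_mem_head? hh)
        exact isdigit_ne_dot (hdig x hxmem) (hcon ▸ rfl)

theorem isSubsection_iff (n : Nat) (s : String) :
    isSubsection s (n : Int) = true ↔ Good (n : Int) s := by
  constructor
  · intro h
    simp only [isSubsection] at h
    by_cases hts : (s == "C-TS6.15") = true
    · exact Or.inl (by simpa using hts)
    rw [if_neg hts] at h
    by_cases hsw : PySem.Str.startswith s "C" = true
    case neg =>
      have hsw' : PySem.Str.startswith s "C" = false := Bool.eq_false_iff.mpr hsw
      rw [if_pos (show (!PySem.Str.startswith s "C") = true by rw [hsw']; rfl)] at h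
      exact absurd h (by simp)
    rw [if_neg (show ¬ (!PySem.Str.startswith s "C") = true by rw [hsw]; simp)] at h
    by_cases hdot : PySem.Str.find s "." < 0
    · rw [if_pos hdot] at h; exact absurd h (by simp)
    rw [if_neg hdot] at h
    set a := PySem.Str.slice s (some 1) (some (PySem.Str.find s ".")) with hadef
    set b := PySem.Str.slice s (some (PySem.Str.find s "." + 1)) none with hbdef
    by_cases hdig : PySem.Str.strIsdigit a = true
    case neg =>
      have hdig' : PySem.Str.strIsdigit a = false := Bool.eq_false_iff.mpr hdig
      rw [if_pos (show (!PySem.Str.strIsdigit a) = true by rw [hdig']; rfl)] at h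
      exact absurd h (by simp)
    rw [if_neg (show ¬ (!PySem.Str.strIsdigit a) = true by rw [hdig]; simp)] at h
    by_cases hcan : (a != "0" && PySem.Str.startswith a "0") = true
    · rw [if_pos hcan] at h; exact absurd h (by simp)
    rw [if_neg hcan] at h
    rw [Bool.and_eq_true] at h
    obtain ⟨hcmp, hmem⟩ := h
    -- decompose s around the first '.'
    obtain ⟨t, ht⟩ : ∃ t, s.toList = 'C' :: t := by
      have hp : ['C'] <+: s.toList := by
        rw [← PySem.Chars.startswith_iff, ← toList_C, ← PySem.Str.startswith_eq]
        exact hsw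
      obtain ⟨u, hu⟩ := hp
      exact ⟨u, hu.symm⟩
    have hdot0 : 0 ≤ PySem.Str.find s "." := not_lt.mp hdot
    have hfind : PySem.Str.find s "." = PySem.Chars.find s.toList ['.'] := by
      rw [PySem.Str.find, toList_dot]
    obtain ⟨hpre, hmin⟩ := PySem.Chars.find_spec (s := s.toList) (sub := ['.'])
      (by rw [← hfind]; exact hdot0)
    rw [← hfind] at hpre hmin
    obtain ⟨dt, hdtn⟩ := Int.eq_ofNat_of_zero_le hdot0
    have htoNat : (PySem.Str.find s ".").toNat = dt := by rw [hdtn]; exact Int.toNat_natCast _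
    rw [htoNat] at hpre hmin
    have hdtlt : dt < s.toList.length := by
      by_contra hge
      have hnil : s.toList.drop dt = [] := List.drop_eq_nil_iff.mpr (by omega)
      rw [hnil] at hpre
      simp at hpre
    have hgetdot : s.toList.drop dt = '.' :: s.toList.drop (dt + 1) := by
      rw [List.drop_eq_getElem_cons hdtlt]
      have hh := (singleton_prefix_iff '.' _).mp hpre
      rw [List.drop_eq_getElem_cons hdtlt, List.head?_cons] at hh
      simp only [Option.some.injEq] at hh
      rw [hh]
    have hdt1 : 1 ≤ dt := by
      by_contra h0
      have h0' : dt = 0 := by omega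
      rw [h0', List.drop_zero, ht] at hgetdot
      have : 'C' = '.' := by injection hgetdot
      exact absurd this (by decide)
    obtain ⟨dt', rfl⟩ : ∃ dt', dt = dt' + 1 := ⟨dt - 1, by omega⟩
    have hdotcast : PySem.Str.find s "." = ((dt' + 1 : Nat) : Int) := hdtn
    have haL : a.toList = t.take dt' := by
      rw [hadef, PySem.Str.slice, String.toList_ofList, PySem.Chars.slice_eq_listSlice,
        hdotcast, show (1 : Int) = ((1 : Nat) : Int) from rfl, PySem.List.slice_natCast, ht]
      simp
    have hbL : b.toList = s.toList.drop (dt' + 2) := by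
      rw [hbdef, PySem.Str.slice, String.toList_ofList, PySem.Chars.slice_eq_listSlice,
        hdotcast, show ((dt' + 1 : Nat) : Int) + 1 = ((dt' + 2 : Nat) : Int) by push_cast; ring,
        PySem.List.slice_from_natCast]
    have hS : s.toList = 'C' :: (a.toList ++ '.' :: b.toList) := by
      calc s.toList = s.toList.take (dt' + 1) ++ s.toList.drop (dt' + 1) :=
            (List.take_append_drop _ _).symm
        _ = ('C' :: t.take dt') ++ ('.' :: s.toList.drop (dt' + 2)) := by
            rw [hgetdot, ht, List.take_succ_cons]
        _ = 'C' :: (a.toList ++ '.' :: b.toList) := by rw [haL, hbL]; rfl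
    -- the numeric part a
    obtain ⟨hane, hadig⟩ := (strIsdigit_char_iff a).mp hdig
    have hcanon : a.toList = ['0'] ∨ a.toList.head? ≠ some '0' := by
      have hcan' : (a != "0" && PySem.Str.startswith a "0") = false :=
        Bool.eq_false_iff.mpr hcan
      rcases Bool.and_eq_false_iff.mp hcan' with hne | hsw0
      · left
        have ha0 : a = "0" := by simpa using hne
        rw [ha0, toList_zero]
      · right
        intro hh
        rw [(startswith_zero_iff a).mpr hh] at hsw0
        simp at hsw0
    have hAi : Nat.toDigits 10 (dVal a.toList) = a.toList :=
      toDigits_dVal _ hane hadig hcanon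
    have hiltn : dVal a.toList < n := by
      apply (cmp_iff (dVal a.toList) n).mp
      rw [hAi]
      rw [Bool.or_eq_true, Bool.and_eq_true] at hcmp
      rcases hcmp with hlt | ⟨heq, hlex⟩
      · left
        have := of_decide_eq_true hlt
        rw [PySem.Str.len_eq, PySem.Str.len_eq, toStr_nat_toList] at this
        exact_mod_cast this
      · right
        constructor
        · have := of_decide_eq_true heq
          rw [PySem.Str.len_eq, PySem.Str.len_eq, toStr_nat_toList] at this
          exact_mod_cast this
        · have hlex' : a.toList < PySem.Int.toChars (n : Int) := by
            simpa [PySem.Chars.strLt] using hlex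
          rwa [toChars_natCast] at hlex'
    -- the subsection part b
    have hmem' := (mem_pyJStrs_iff b).mp
      (by rw [List.contains_eq_mem, decide_eq_true_eq] at hmem; exact hmem)
    obtain ⟨j, hj1, hj20, rfl_b⟩ := hmem'
    refine Or.inr ⟨(dVal a.toList : Int), j, Int.natCast_nonneg _, by exact_mod_cast hiltn,
      hj1, hj20, ?_⟩
    apply String.toList_inj.mp
    rw [hS, mkName_toList _ _ (Int.natCast_nonneg _)]
    rw [Int.toNat_natCast, hAi, rfl_b]
  · intro hg
    rcases hg with hlit | ⟨i, j, hi0, hin, hj1, hj20, rfl⟩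
    · rw [hlit]
      simp [isSubsection]
    by_cases hts : (mkName i j == "C-TS6.15") = true
    · simp only [isSubsection]
      rw [if_pos hts]
    simp only [isSubsection]
    rw [if_neg hts]
    obtain ⟨it, rfl⟩ := Int.eq_ofNat_of_zero_le hi0
    have hitn : it < n := by exact_mod_cast hin
    have hsL := mkName_toList (it : Int) j (Int.natCast_nonneg _)
    rw [Int.toNat_natCast] at hsL
    set D := Nat.toDigits 10 it with hD
    set B := (PySem.Int.toStr j).toList with hB
    have hDdig : ∀ c ∈ D, PySem.Chars.isdigit c = true := fun c hc => toDigits_digits hc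
    have hfind : PySem.Str.find (mkName (it : Int) j) "." = ((1 + D.length : Nat) : Int) := by
      rw [PySem.Str.find, toList_dot, hsL]
      exact find_name D B hDdig
    have hsw : PySem.Str.startswith (mkName (it : Int) j) "C" = true := by
      rw [PySem.Str.startswith_eq, PySem.Chars.startswith_iff, toList_C, hsL,
        singleton_prefix_iff, List.head?_cons]
    rw [if_neg (show ¬ (!PySem.Str.startswith (mkName (it : Int) j) "C") = true by
      rw [hsw]; simp)]
    rw [hfind]
    rw [if_neg (not_lt.mpr (Int.natCast_nonneg _))]
    have haL : (PySem.Str.slice (mkName (it : Int) j) (some 1)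
        (some ((1 + D.length : Nat) : Int))).toList = D := by
      rw [PySem.Str.slice, String.toList_ofList, PySem.Chars.slice_eq_listSlice,
        show (1 : Int) = ((1 : Nat) : Int) from rfl, PySem.List.slice_natCast, hsL,
        List.drop_succ_cons, List.drop_zero, show 1 + D.length - 1 = D.length by omega]
      exact List.take_left
    have hbL : (PySem.Str.slice (mkName (it : Int) j)
        (some (((1 + D.length : Nat) : Int) + 1)) none).toList = B := by
      rw [PySem.Str.slice, String.toList_ofList, PySem.Chars.slice_eq_listSlice,
        show ((1 + D.length : Nat) : Int) + 1 = ((D.length + 1 + 1 : Nat) : Int) by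
          push_cast; ring,
        PySem.List.slice_from_natCast, hsL, List.drop_succ_cons,
        show D ++ '.' :: B = (D ++ ['.']) ++ B by simp,
        show D.length + 1 = (D ++ ['.']).length by simp]
      exact List.drop_left
    have hdig : PySem.Str.strIsdigit (PySem.Str.slice (mkName (it : Int) j) (some 1)
        (some ((1 + D.length : Nat) : Int))) = true :=
      (strIsdigit_char_iff _).mpr ⟨by rw [haL]; exact toDigits_ne_nil it,
        by rw [haL]; exact hDdig⟩
    rw [if_neg (show ¬ (!PySem.Str.strIsdigit (PySem.Str.slice (mkName (it : Int) j) (some 1)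
      (some ((1 + D.length : Nat) : Int)))) = true by rw [hdig]; simp)]
    have hcanF : ((PySem.Str.slice (mkName (it : Int) j) (some 1)
        (some ((1 + D.length : Nat) : Int))) != "0" &&
        PySem.Str.startswith (PySem.Str.slice (mkName (it : Int) j) (some 1)
          (some ((1 + D.length : Nat) : Int))) "0") = false := by
      by_cases hit0 : it = 0
      · have h0 : PySem.Str.slice (mkName (it : Int) j) (some 1)
            (some ((1 + D.length : Nat) : Int)) = "0" := by
          apply String.toList_inj.mp
          rw [haL, hD, hit0, Nat.toDigits_zero, toList_zero]
        rw [h0]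
        simp
      · have hh : PySem.Str.startswith (PySem.Str.slice (mkName (it : Int) j) (some 1)
            (some ((1 + D.length : Nat) : Int))) "0" = false := by
          apply Bool.eq_false_iff.mpr
          intro hcon
          have := (startswith_zero_iff _).mp hcon
          rw [haL] at this
          exact toDigits_head_ne_zero it (by omega) this
        rw [hh, Bool.and_false]
    rw [if_neg (show ¬ ((PySem.Str.slice (mkName (it : Int) j) (some 1)
      (some ((1 + D.length : Nat) : Int))) != "0" &&
      PySem.Str.startswith (PySem.Str.slice (mkName (it : Int) j) (some 1)
        (some ((1 + D.length : Nat) : Int))) "0") = true by rw [hcanF]; simp)]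
    rw [Bool.and_eq_true]
    constructor
    · have hcmp := (cmp_iff it n).mpr hitn
      rw [Bool.or_eq_true]
      rcases hcmp with hlen | ⟨hleq, hlex⟩
      · left
        rw [decide_eq_true_eq, PySem.Str.len_eq, PySem.Str.len_eq, toStr_nat_toList, haL]
        exact_mod_cast hlen
      · right
        rw [Bool.and_eq_true]
        constructor
        · rw [decide_eq_true_eq, PySem.Str.len_eq, PySem.Str.len_eq, toStr_nat_toList, haL]
          exact_mod_cast hleq
        · simp only [PySem.Chars.strLt]
          rw [decide_eq_true_eq, haL, toStr_nat_toList]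
          exact hlex
    · rw [List.contains_eq_mem, decide_eq_true_eq]
      apply (mem_pyJStrs_iff _).mpr
      exact ⟨j, hj1, hj20, String.toList_inj.mp (by rw [hbL])⟩


theorem pred_eq (n : Nat) (s : String) :
    (((PySem.List.pyRange 0 (n : Int)).foldl (fun acc i =>
        let subsection := "C" ++ (PySem.Int.toStr i ++ ".")
        (PySem.List.pyRange 0 20).foldl (fun acc2 j =>
          acc2 ++ [subsection ++ PySem.Int.toStr (j + 1)]) acc) [])
      ++ ["C-TS6.15"]).contains s = isSubsection s (n : Int) := by
  rw [List.contains_eq_mem]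
  have h1 := mem_names (n : Int) s
  have h2 := isSubsection_iff n s
  by_cases hg : Good (n : Int) s
  · simp only [h1, hg, decide_true, h2.mpr hg]
  · have hfalse : isSubsection s (n : Int) = false := by
      rw [← Bool.not_eq_true, h2]; exact hg
    simp only [h1, hg, decide_false, hfalse]

theorem inner_loop_eq (names : List String) (row : List String) (acc : List String) :
    (PySem.List.pyRange 0 (row.length : Int)).foldl (fun acc2 j =>
      if names.contains (PySem.List.pyGetD row j "") then
        acc2 ++ [PySem.List.pyGetD row j ""] else acc2) acc
    = acc ++ row.filter (fun cell => names.contains cell) := by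
  have h := PySem.List.foldl_pyRange_zero_pyGetD' (α := String) (β := List String) row ""
    (fun acc2 cell => if names.contains cell then acc2 ++ [cell] else acc2) acc
  rw [PySem.List.foldl_append_if_eq_filter] at h
  exact h

theorem outer_loop_eq (names : List String) (sections : List (List String)) :
    (PySem.List.pyRange 0 (sections.length : Int)).foldl (fun acc i =>
      (PySem.List.pyRange 0 ((PySem.List.pyGetD sections i []).length : Int)).foldl (fun acc2 j =>
        if names.contains (PySem.List.pyGetD (PySem.List.pyGetD sections i []) j "") then
          acc2 ++ [PySem.List.pyGetD (PySem.List.pyGetD sections i []) j ""] else acc2) acc) []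
    = sections.flatMap (fun row => row.filter (fun cell => names.contains cell)) := by
  have h := PySem.List.foldl_pyRange_zero_pyGetD' (α := List String) (β := List String)
    sections []
    (fun acc row => acc ++ row.filter (fun cell => names.contains cell)) []
  simp only [inner_loop_eq]
  rw [PySem.List.foldl_append_eq_flatMap] at h
  simpa using h

theorem alt_eq (sections : List (List String)) :
    defining_all_subsections_alt sections
    = sections.flatMap (fun row =>
        row.filter (fun cell => isSubsection cell (sections.length : Int))) := by
  unfold defining_all_subsections_alt
  simp only [PySem.List.foldl_append_if_eq_filter, PySem.List.foldl_append_eq_flatMap,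
    List.nil_append]

-- ===== VERDICT (by name: the statement is the Claim_ definition above) =====
theorem defining_all_subsections_spec : Claim_equal_defining_all_subsections := by
  intro sections _
  unfold Spec_defining_all_subsections
  simp only [defining_all_subsections]
  rw [outer_loop_eq, alt_eq]
  simp only [pred_eq]
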